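-- pv_equiv track=rewrite | github.com/yeheun-ktcloud/azure-resource-export | main.py | build_aml_rows
-- ===== SOURCE A (Python) =====
-- from typing import List, Dict, Any, Tuple, Set
--
-- def build_aml_rows(env: str, items: List[Dict[str, Any]]) -> List[Dict[str, Any]]:
--     rows: List[Dict[str, Any]] = []
--     for i in items:
--         rows.append({
--             "Environment": env,
--             "SubscriptionID": i.get("subscriptionId",""),
--             "ResourceGroup":  i.get("resourceGroup",""),
--             "ResourceName":   i.get("name",""),
--             "Type":           i.get("type",""),
--             "Location":       i.get("location",""),
--             "Container Registry": i.get("acrName",""),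
--             "Key Vault":          i.get("kvName",""),
--             "Application Insights": i.get("aiName",""),
--         })
--     return rows
-- ===== SOURCE B (Python) =====
-- FIELDS = [
--     ("SubscriptionID", "subscriptionId"),
--     ("ResourceGroup", "resourceGroup"),
--     ("ResourceName", "name"),
--     ("Type", "type"),
--     ("Location", "location"),
--     ("Container Registry", "acrName"),
--     ("Key Vault", "kvName"),
--     ("Application Insights", "aiName"),
-- ]
--
-- def build_aml_rows(env, items):
--     # Column-major: build each output column across all items, then transpose into rows.
--     n = len(items)
--     columns = [("Environment", [env] * n)]
--     for col, key in FIELDS: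
--         columns.append((col, [i.get(key, "") for i in items]))
--     return [{col: vals[j] for col, vals in columns} for j in range(n)]
-- ===== Notes on version B (the rewrite author's own statement) =====
-- stated objective: alternative
-- what changed: B builds the output column-major: one staged pass per output column (driven by a field table) producing value lists across all items, then transposes the columns into per-item row dicts, instead of A's single row-major loop appending a fixed dict literal per item.
import Mathlib
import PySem

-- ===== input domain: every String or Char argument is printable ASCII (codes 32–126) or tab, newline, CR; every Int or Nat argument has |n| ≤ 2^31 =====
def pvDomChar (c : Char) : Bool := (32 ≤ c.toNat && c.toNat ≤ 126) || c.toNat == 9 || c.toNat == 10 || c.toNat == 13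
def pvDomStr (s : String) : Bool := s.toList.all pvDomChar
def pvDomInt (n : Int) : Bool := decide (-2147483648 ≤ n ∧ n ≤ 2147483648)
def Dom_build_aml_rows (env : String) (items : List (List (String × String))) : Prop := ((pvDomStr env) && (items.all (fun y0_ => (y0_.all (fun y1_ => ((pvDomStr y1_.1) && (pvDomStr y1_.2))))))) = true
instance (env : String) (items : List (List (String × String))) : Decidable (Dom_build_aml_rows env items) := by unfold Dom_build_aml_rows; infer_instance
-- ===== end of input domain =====

-- B builds the output column-major (one staged pass per column, then a transpose into rows)
-- instead of A's row-major loop over hard-coded dict literals (alternative decomposition).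

-- ===== PORT A =====
-- i.get(key, "") : first-match lookup in the association list (exact for a Python dict)
def pvGetD (i : List (String × String)) (k : String) : String :=
  PySem.Dict.getD (PySem.Dict.mk i) k ""

def build_aml_rows (env : String) (items : List (List (String × String))) : List (List (String × String)) :=
  items.foldl (fun rows i =>
    rows ++ [[("Environment", env),
              ("SubscriptionID", pvGetD i "subscriptionId"),
              ("ResourceGroup", pvGetD i "resourceGroup"),
              ("ResourceName", pvGetD i "name"),
              ("Type", pvGetD i "type"),
              ("Location", pvGetD i "location"),
              ("Container Registry", pvGetD i "acrName"),
              ("Key Vault", pvGetD i "kvName"),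
              ("Application Insights", pvGetD i "aiName")]]) []

-- ===== PORT B =====
def FIELDS : List (String × String) :=
  [("SubscriptionID", "subscriptionId"),
   ("ResourceGroup", "resourceGroup"),
   ("ResourceName", "name"),
   ("Type", "type"),
   ("Location", "location"),
   ("Container Registry", "acrName"),
   ("Key Vault", "kvName"),
   ("Application Insights", "aiName")]

-- columns = [("Environment", [env]*n)] ++ one value-list pass per field; then transpose.
-- vals[j] is ported as List.getD (j is always in range: every column has length n).
def build_aml_rows_alt (env : String) (items : List (List (String × String))) : List (List (String × String)) :=
  let n := items.length
  let columns : List (String × List String) :=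
    ("Environment", List.replicate n env) ::
      FIELDS.map (fun ck => (ck.1, items.map (fun i => pvGetD i ck.2)))
  (List.range n).map (fun j => columns.map (fun cv => (cv.1, cv.2.getD j "")))

-- ===== PRECONDITION & SPEC =====
def Spec_build_aml_rows (env : String) (items : List (List (String × String))) (out : List (List (String × String))) : Prop := out = build_aml_rows_alt env items
instance (env : String) (items : List (List (String × String))) (out : List (List (String × String))) : Decidable (Spec_build_aml_rows env items out) := by unfold Spec_build_aml_rows; infer_instance

-- ===== CLAIM (what is proved, stated in full; the proofs are below) =====
def Claim_equal_build_aml_rows : Prop := ∀ (env : String) (items : List (List (String × String))), Dom_build_aml_rows env items → Spec_build_aml_rows env items (build_aml_rows env items)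

-- ===== LEMMAS AND PROOFS =====
def pvRow (env : String) (i : List (String × String)) : List (String × String) :=
  [("Environment", env),
   ("SubscriptionID", pvGetD i "subscriptionId"),
   ("ResourceGroup", pvGetD i "resourceGroup"),
   ("ResourceName", pvGetD i "name"),
   ("Type", pvGetD i "type"),
   ("Location", pvGetD i "location"),
   ("Container Registry", pvGetD i "acrName"),
   ("Key Vault", pvGetD i "kvName"),
   ("Application Insights", pvGetD i "aiName")]

theorem foldl_append_singleton {α β : Type} (f : α → β) (acc : List β) (xs : List α) :
    xs.foldl (fun rows i => rows ++ [f i]) acc = acc ++ xs.map f := by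
  induction xs generalizing acc with
  | nil => simp
  | cons x xs ih => simp [List.foldl, ih]

theorem A_eq_map (env : String) (items : List (List (String × String))) :
    build_aml_rows env items = items.map (pvRow env) := by
  rw [build_aml_rows, foldl_append_singleton]
  simp [pvRow]

-- ===== VERDICT (by name: the statement is the Claim_ definition above) =====
theorem build_aml_rows_spec : Claim_equal_build_aml_rows := by
  intro env items _
  show build_aml_rows env items = build_aml_rows_alt env items
  rw [A_eq_map]
  unfold build_aml_rows_alt
  apply List.ext_getElem
  · simp
  · intro j h1 h2
    have hj : j < items.length := by simpa using h2
    simp [FIELDS, List.getD_eq_getElem?_getD, List.getElem?_replicate, hj, pvRow]
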